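-- pv_equiv track=rewrite | github.com/NicholasTurner23/sheets-mock | helpers.py | get_row_column_from_label
-- ===== SOURCE A (Python) =====
-- def get_row_column_from_label(label:str) -> tuple:
--     row: list[str]=[]
--     col: list[str]=[]
--     for i in range(len(label)):
--         if label[i].isnumeric():
--             row.append(label[i])
--         elif label[i].isalpha():
--             col.append(label[i])
--         else:
--             raise ValueError()
--     return "".join(row), "".join(col)
-- ===== SOURCE B (Python) =====
-- def get_row_column_from_label(label: str) -> tuple:
--     row = "".join(c for c in label if c.isnumeric())
--     col = "".join(c for c in label if c.isalpha())
--     if len(row) + len(col) != len(label):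
--         raise ValueError()
--     return row, col
-- ===== Notes on version B (the rewrite author's own statement) =====
-- stated objective: simpler
-- what changed: Replaces the interleaved per-character classify-and-raise loop by two independent filtering passes (digits, letters) plus one aggregate length check for validation.
import Mathlib
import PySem

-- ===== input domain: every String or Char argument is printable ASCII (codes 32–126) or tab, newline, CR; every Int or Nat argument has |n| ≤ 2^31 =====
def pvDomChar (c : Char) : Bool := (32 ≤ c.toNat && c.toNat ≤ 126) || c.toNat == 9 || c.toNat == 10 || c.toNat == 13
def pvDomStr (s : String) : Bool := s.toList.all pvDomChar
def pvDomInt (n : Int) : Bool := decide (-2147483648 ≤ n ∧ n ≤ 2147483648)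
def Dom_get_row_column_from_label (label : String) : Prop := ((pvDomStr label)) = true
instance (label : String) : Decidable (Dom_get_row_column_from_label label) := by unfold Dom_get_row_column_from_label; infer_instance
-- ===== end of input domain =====

-- B splits the work into two independent filtering passes plus one aggregate length check; simpler decomposition, same behaviour.
-- Python's c.isnumeric() is ported as PySem.Chars.isdigit: on the ASCII domain Dom (codes 32..126, tab, LF, CR) the only
-- numeric characters are the decimal digits, so the two predicates agree on every character these theorems quantify over.

-- ===== PORT A =====
-- A's for-loop over label[i], accumulating row/col; 'raise ValueError' is modelled by none (excluded by Pre_).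
def pvA_loop : List Char → List Char → List Char → Option (List Char × List Char)
  | [], row, col => some (row, col)
  | c :: rest, row, col =>
    if PySem.Chars.isdigit c then pvA_loop rest (row ++ [c]) col
    else if PySem.Chars.isalpha c then pvA_loop rest row (col ++ [c])
    else none

def get_row_column_from_label (label : String) : String × String :=
  match pvA_loop label.toList [] [] with
  | some (r, c) => (String.ofList r, String.ofList c)
  | none => ("", "")  -- ValueError; Pre_ excludes these inputs

-- ===== PORT B =====
def get_row_column_from_label_alt (label : String) : String × String :=
  let row := label.toList.filter PySem.Chars.isdigit
  let col := label.toList.filter PySem.Chars.isalpha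
  if row.length + col.length ≠ label.toList.length then ("", "")  -- ValueError; outside Pre_
  else (String.ofList row, String.ofList col)

-- ===== PRECONDITION & SPEC =====
-- Pre_ excludes the labels containing a character that is neither a digit nor alphabetic: within the ASCII domain Dom,
-- where isnumeric holds exactly for decimal digits, these are exactly the inputs on which A (and B) raise ValueError; A returns on all others.
def Pre_get_row_column_from_label (label : String) : Prop :=
  label.toList.all (fun c => PySem.Chars.isdigit c || PySem.Chars.isalpha c) = true
instance (label : String) : Decidable (Pre_get_row_column_from_label label) := by
  unfold Pre_get_row_column_from_label; infer_instance

def pvWitness_get_row_column_from_label : String := "AB12c"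

def Spec_get_row_column_from_label (label : String) (out : String × String) : Prop := out = get_row_column_from_label_alt label
instance (label : String) (out : String × String) : Decidable (Spec_get_row_column_from_label label out) := by unfold Spec_get_row_column_from_label; infer_instance

-- ===== CLAIM (what is proved, stated in full; the proofs are below) =====
def Claim_equal_get_row_column_from_label : Prop := ∀ (label : String), Dom_get_row_column_from_label label → Pre_get_row_column_from_label label → Spec_get_row_column_from_label label (get_row_column_from_label label)

-- ===== LEMMAS AND PROOFS =====

theorem pv_digit_not_alpha (c : Char) (h : PySem.Chars.isdigit c = true) :
    PySem.Chars.isalpha c = false := by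
  unfold PySem.Chars.isdigit PySem.Chars.isalpha PySem.Chars.isupper PySem.Chars.islower at *
  simp [Char.le_def, UInt32.le_iff_toNat_le] at *
  omega

theorem pvA_loop_eq (l row col : List Char)
    (h : ∀ c ∈ l, PySem.Chars.isdigit c = true ∨ PySem.Chars.isalpha c = true) :
    pvA_loop l row col = some (row ++ l.filter PySem.Chars.isdigit, col ++ l.filter PySem.Chars.isalpha) := by
  induction l generalizing row col with
  | nil => simp [pvA_loop]
  | cons c rest ih =>
    have hc := h c (List.mem_cons_self ..)
    have hrest : ∀ c ∈ rest, PySem.Chars.isdigit c = true ∨ PySem.Chars.isalpha c = true :=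
      fun x hx => h x (List.mem_cons_of_mem _ hx)
    by_cases hd : PySem.Chars.isdigit c = true
    · simp [pvA_loop, hd, pv_digit_not_alpha c hd, ih _ _ hrest]
    · have ha : PySem.Chars.isalpha c = true := hc.resolve_left hd
      simp [pvA_loop, hd, ha, ih _ _ hrest]

theorem pv_filter_len (l : List Char)
    (h : ∀ c ∈ l, PySem.Chars.isdigit c = true ∨ PySem.Chars.isalpha c = true) :
    (l.filter PySem.Chars.isdigit).length + (l.filter PySem.Chars.isalpha).length = l.length := by
  induction l with
  | nil => simp
  | cons c rest ih =>
    have hc := h c (List.mem_cons_self ..)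
    have hrest := ih (fun x hx => h x (List.mem_cons_of_mem _ hx))
    by_cases hd : PySem.Chars.isdigit c = true
    · simp [hd, pv_digit_not_alpha c hd]; omega
    · have ha : PySem.Chars.isalpha c = true := hc.resolve_left hd
      simp [hd, ha]; omega

-- ===== VERDICT (by name: the statement is the Claim_ definition above) =====
theorem get_row_column_from_label_spec : Claim_equal_get_row_column_from_label := by
  intro label _ hpre
  unfold Spec_get_row_column_from_label get_row_column_from_label get_row_column_from_label_alt
  have h : ∀ c ∈ label.toList, PySem.Chars.isdigit c = true ∨ PySem.Chars.isalpha c = true := by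
    intro c hc
    have := List.all_eq_true.mp hpre c hc
    simpa using this
  rw [pvA_loop_eq _ _ _ h]
  simp [pv_filter_len _ h]
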